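-- pv_equiv track=rewrite | github.com/wandafulworld/Cayley_Tree | ConcreteTrees.py | _tree_edges
-- ===== SOURCE A (Python) =====
-- def _tree_edges(n,r):
--     """
--     Iteratively defines the tree structure
--     :param n: Number of nodes
--     :param r: Connectivity (k)
--     :return: A list of tuples that define the edges of our tree
--     """
--     if n == 0:
--         return
--     # helper function for trees
--     # yields edges in rooted tree at 0 with n nodes and branching ratio r
--     nodes = iter(range(n))
--     cayley_shell = [next(nodes)]  # stack of max length r
--     lieb_shell = []
--     r = r + 1
--     first_run = True
--     # Iterative filling of shells
--     while cayley_shell: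
--         source = cayley_shell.pop(0)
--         for i in range(r):
--             try:
--                 target = next(nodes)
--                 lieb_shell.append(target)
--                 yield source, target
--             except StopIteration:
--                 break
--         if first_run:
--             r = r - 1
--             first_run = False
--
--         if not cayley_shell:
--             for lieb_node in lieb_shell:
--                 try:
--                     target = next(nodes)
--                     cayley_shell.append(target)
--                     yield lieb_node,target
--                 except StopIteration:
--                     break
--             lieb_shell = []
-- ===== SOURCE B (Python) =====
-- def _tree_edges(n, r):
--     # Single FIFO queue of (node, is_cayley) tags replaces the two-shell batch
--     # refill; cayley nodes spawn r children (root r+1), lieb nodes spawn 1.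
--     if n <= 0:
--         return
--     q = [(0, True)]
--     nxt = 1
--     first = True
--     while q and nxt < n:
--         node, cay = q.pop(0)
--         cnt = (r + 1 if first else r) if cay else 1
--         first = False
--         for _ in range(cnt):
--             if nxt >= n:
--                 break
--             yield node, nxt
--             q.append((nxt, not cay))
--             nxt += 1
-- ===== Notes on version B (the rewrite author's own statement) =====
-- stated objective: simpler
-- what changed: Replaced the two-shell (cayley/lieb) batch-refill loop with try/except and first_run bookkeeping by a single FIFO queue of (node, is_cayley)-tagged entries and one id counter: each popped node spawns its children (r+1 for the root, r for cayley nodes, 1 for lieb nodes) directly into the queue.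
-- crash fix: On n < 0 A raises RuntimeError (uncaught StopIteration from next() on an empty range iterator) while B returns no edges. — e.g. on _tree_edges(-1, 2): A raises RuntimeError, B returns []
import Mathlib
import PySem

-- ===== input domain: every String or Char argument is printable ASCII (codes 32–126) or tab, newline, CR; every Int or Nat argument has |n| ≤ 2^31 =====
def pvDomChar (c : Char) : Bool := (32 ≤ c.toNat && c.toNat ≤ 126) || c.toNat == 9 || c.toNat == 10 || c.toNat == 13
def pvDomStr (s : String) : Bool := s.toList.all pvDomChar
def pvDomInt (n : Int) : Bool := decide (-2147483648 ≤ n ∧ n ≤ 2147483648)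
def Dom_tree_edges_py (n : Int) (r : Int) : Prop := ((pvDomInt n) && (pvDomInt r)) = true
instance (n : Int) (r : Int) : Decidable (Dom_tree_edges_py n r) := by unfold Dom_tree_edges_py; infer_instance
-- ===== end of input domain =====

-- B replaces A's two-shell batch refill by a single FIFO queue of tagged nodes (objective: simpler).
-- Both ports collect the generator's yields into a list; fuel arguments only bound the while loops
-- (n.toNat+1 iterations always suffice, proved below).

-- ===== PORT A =====
-- inner `for i in range(r)` loop: consumes fresh node ids while idx < n, appends them to
-- lieb_shell and yields (source, target); returns (new idx, new lieb_shell, yielded edges)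
def innerCayA (n src : Int) : Nat → Int → List Int → Int × List Int × List (Int × Int)
  | 0, idx, lieb => (idx, lieb, [])
  | k+1, idx, lieb =>
    if idx < n then
      let p := innerCayA n src k (idx + 1) (lieb ++ [idx])
      (p.1, p.2.1, (src, idx) :: p.2.2)
    else (idx, lieb, [])

-- refill `for lieb_node in lieb_shell` loop with its StopIteration break
def refillA (n : Int) : List Int → Int → List Int → Int × List Int × List (Int × Int)
  | [], idx, cay => (idx, cay, [])
  | x :: t, idx, cay =>
    if idx < n then
      let u := refillA n t (idx + 1) (cay ++ [idx])
      (u.1, u.2.1, (x, idx) :: u.2.2)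
    else (idx, cay, [])

-- `while cayley_shell:` loop of A
def outerA (n : Int) : Nat → List Int → List Int → Int → Bool → Int → List (Int × Int)
  | 0, _, _, _, _, _ => []
  | _+1, [], _, _, _, _ => []
  | f+1, src :: ct, lieb, rs, first, idx =>
    let p := innerCayA n src rs.toNat idx lieb
    let rs1 := if first then rs - 1 else rs
    match ct with
    | [] =>
      let u := refillA n p.2.1 p.1 []
      p.2.2 ++ u.2.2 ++ outerA n f u.2.1 [] rs1 false u.1
    | c :: cs => p.2.2 ++ outerA n f (c :: cs) p.2.1 rs1 false p.1

def tree_edges_py (n : Int) (r : Int) : List (Int × Int) :=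
  if n = 0 then [] else outerA n (n.toNat + 1) [0] [] (r + 1) true 1

-- ===== PORT B =====
-- inner `for _ in range(cnt)` loop of B: yield edges, enqueue tagged children
def spawnB (n node : Int) (tag : Bool) : Nat → List (Int × Bool) → Int → List (Int × Bool) × Int × List (Int × Int)
  | 0, q, nxt => (q, nxt, [])
  | k+1, q, nxt =>
    if nxt < n then
      let t := spawnB n node tag k (q ++ [(nxt, tag)]) (nxt + 1)
      (t.1, t.2.1, (node, nxt) :: t.2.2)
    else (q, nxt, [])

-- `while q and nxt < n:` loop of B
def loopB (n r : Int) : Nat → List (Int × Bool) → Int → Bool → List (Int × Int)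
  | 0, _, _, _ => []
  | _+1, [], _, _ => []
  | f+1, (node, cay) :: qt, nxt, first =>
    if nxt < n then
      let cnt := if cay then (if first then r + 1 else r) else 1
      let t := spawnB n node (!cay) cnt.toNat qt nxt
      t.2.2 ++ loopB n r f t.1 t.2.1 false
    else []

def tree_edges_py_alt (n : Int) (r : Int) : List (Int × Int) :=
  if n ≤ 0 then [] else loopB n r (n.toNat + 1) [(0, true)] 1 true

-- ===== PRECONDITION & SPEC =====
-- Pre_ excludes n < 0, on which A's generator raises RuntimeError (uncaught StopIteration at the first next()).
def Pre_tree_edges_py (n : Int) (r : Int) : Prop := 0 ≤ n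
instance (n : Int) (r : Int) : Decidable (Pre_tree_edges_py n r) := by unfold Pre_tree_edges_py; infer_instance
def pvWitness_tree_edges_py : Int × Int := (7, 2)

-- On n < 0 A raises RuntimeError while B returns the empty edge list.
def Raises_tree_edges_py (n : Int) (r : Int) : Prop := n < 0
instance (n : Int) (r : Int) : Decidable (Raises_tree_edges_py n r) := by unfold Raises_tree_edges_py; infer_instance
def pvRaiseWitness_tree_edges_py : Int × Int := (-1, 2)
def pvRaiseWitnessOut_tree_edges_py : List (Int × Int) := []

def Spec_tree_edges_py (n : Int) (r : Int) (out : List (Int × Int)) : Prop := out = tree_edges_py_alt n r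
instance (n : Int) (r : Int) (out : List (Int × Int)) : Decidable (Spec_tree_edges_py n r out) := by unfold Spec_tree_edges_py; infer_instance

-- ===== CLAIM (what is proved, stated in full; the proofs are below) =====
def Claim_equal_tree_edges_py : Prop := ∀ (n : Int) (r : Int), Dom_tree_edges_py n r → Pre_tree_edges_py n r → Spec_tree_edges_py n r (tree_edges_py n r)
def Claim_raises_tree_edges_py : Prop := (∀ (n : Int) (r : Int), Dom_tree_edges_py n r → Raises_tree_edges_py n r → ¬ Pre_tree_edges_py n r) ∧ (Dom_tree_edges_py (pvRaiseWitness_tree_edges_py.1) (pvRaiseWitness_tree_edges_py.2) ∧ Raises_tree_edges_py (pvRaiseWitness_tree_edges_py.1) (pvRaiseWitness_tree_edges_py.2) ∧ tree_edges_py_alt (pvRaiseWitness_tree_edges_py.1) (pvRaiseWitness_tree_edges_py.2) = pvRaiseWitnessOut_tree_edges_py)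

-- ===== LEMMAS AND PROOFS =====

-- size/monotonicity facts about the inner loops (used for fuel bookkeeping)
theorem innerCayA_meta (n src : Int) : ∀ (k : Nat) (idx : Int) (lieb : List Int),
    idx ≤ (innerCayA n src k idx lieb).1 ∧
    (innerCayA n src k idx lieb).2.1.length + (n - (innerCayA n src k idx lieb).1).toNat
      ≤ lieb.length + (n - idx).toNat := by
  intro k
  induction k with
  | zero => intro idx lieb; simp [innerCayA]
  | succ k ih =>
    intro idx lieb
    by_cases h : idx < n
    · have := ih (idx + 1) (lieb ++ [idx])
      simp only [innerCayA, if_pos h, List.length_append, List.length_cons, List.length_nil] at *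
      omega
    · simp [innerCayA, h]

theorem refillA_meta (n : Int) : ∀ (L : List Int) (idx : Int) (cay : List Int),
    idx ≤ (refillA n L idx cay).1 ∧
    (refillA n L idx cay).2.1.length + (n - (refillA n L idx cay).1).toNat
      ≤ cay.length + (n - idx).toNat := by
  intro L
  induction L with
  | nil => intro idx cay; simp [refillA]
  | cons x t ih =>
    intro idx cay
    by_cases h : idx < n
    · have := ih (idx + 1) (cay ++ [idx])
      simp only [refillA, if_pos h, List.length_append, List.length_cons, List.length_nil] at *
      omega
    · simp [refillA, h]

-- the lieb/cay accumulators are append-only: extract them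
theorem innerCayA_acc (n src : Int) : ∀ (k : Nat) (idx : Int) (L : List Int),
    innerCayA n src k idx L
      = ((innerCayA n src k idx []).1, L ++ (innerCayA n src k idx []).2.1, (innerCayA n src k idx []).2.2) := by
  intro k
  induction k with
  | zero => intro idx L; simp [innerCayA]
  | succ k ih =>
    intro idx L
    by_cases h : idx < n
    · simp only [innerCayA, if_pos h, List.nil_append]
      rw [ih (idx + 1) (L ++ [idx]), ih (idx + 1) [idx]]
      simp
    · simp [innerCayA, h]

theorem refillA_acc (n : Int) : ∀ (L : List Int) (idx : Int) (C : List Int),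
    refillA n L idx C
      = ((refillA n L idx []).1, C ++ (refillA n L idx []).2.1, (refillA n L idx []).2.2) := by
  intro L
  induction L with
  | nil => intro idx C; simp [refillA]
  | cons x t ih =>
    intro idx C
    by_cases h : idx < n
    · simp only [refillA, if_pos h, List.nil_append]
      rw [ih (idx + 1) (C ++ [idx]), ih (idx + 1) [idx]]
      simp
    · simp [refillA, h]

-- B's inner loop simulates A's inner loop, tagging the new nodes as lieb (false)
theorem spawnB_sim (n src : Int) : ∀ (k : Nat) (idx : Int) (q : List (Int × Bool)),
    spawnB n src false k q idx
      = (q ++ ((innerCayA n src k idx []).2.1).map (fun x => (x, false)),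
         (innerCayA n src k idx []).1, (innerCayA n src k idx []).2.2) := by
  intro k
  induction k with
  | zero => intro idx q; simp [spawnB, innerCayA]
  | succ k ih =>
    intro idx q
    by_cases h : idx < n
    · simp only [spawnB, innerCayA, if_pos h, List.nil_append]
      rw [ih (idx + 1) (q ++ [(idx, false)]), innerCayA_acc n src k (idx + 1) [idx]]
      simp
    · simp [spawnB, innerCayA, h]

-- once the node supply is exhausted nothing more is yielded, on either side
theorem innerCayA_dead (n src : Int) (k : Nat) (idx : Int) (lieb : List Int) (h : n ≤ idx) :
    innerCayA n src k idx lieb = (idx, lieb, []) := by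
  cases k <;> simp [innerCayA, not_lt.2 h]

theorem refillA_dead (n : Int) (L : List Int) (idx : Int) (cay : List Int) (h : n ≤ idx) :
    refillA n L idx cay = (idx, cay, []) := by
  cases L <;> simp [refillA, not_lt.2 h]

theorem outerA_dead (n : Int) : ∀ (f : Nat) (cay lieb : List Int) (rs : Int) (first : Bool) (idx : Int),
    n ≤ idx → outerA n f cay lieb rs first idx = [] := by
  intro f
  induction f with
  | zero => intro cay lieb rs first idx _; simp [outerA]
  | succ f ih =>
    intro cay lieb rs first idx h
    cases cay with
    | nil => simp [outerA]
    | cons src ct =>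
      cases ct with
      | nil =>
        simp only [outerA, innerCayA_dead n src _ idx lieb h, refillA_dead n lieb idx [] h]
        simpa using ih [] [] _ false idx h
      | cons c cs =>
        simp only [outerA, innerCayA_dead n src _ idx lieb h]
        simpa using ih (c :: cs) lieb _ false idx h

theorem loopB_dead (n r : Int) (f : Nat) (q : List (Int × Bool)) (nxt : Int) (first : Bool)
    (h : n ≤ nxt) : loopB n r f q nxt first = [] := by
  cases f with
  | zero => simp [loopB]
  | succ f => cases q with
    | nil => simp [loopB]
    | cons p t => cases p; simp [loopB, not_lt.2 h]

-- one step of B's while loop when the queue is non-empty and ids remain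
theorem loopB_cons (n r : Int) (f : Nat) (node cnt : Int) (cay : Bool) (qt : List (Int × Bool))
    (nxt : Int) (first : Bool) (h : nxt < n)
    (hcnt : (if cay then (if first then r + 1 else r) else 1) = cnt) :
    loopB n r (f + 1) ((node, cay) :: qt) nxt first
      = (spawnB n node (!cay) cnt.toNat qt nxt).2.2
        ++ loopB n r f (spawnB n node (!cay) cnt.toNat qt nxt).1
             (spawnB n node (!cay) cnt.toNat qt nxt).2.1 false := by
  subst hcnt; simp [loopB, h]

-- B's queue, while its front holds lieb-tagged nodes, performs exactly A's refill pass
theorem lieb_sim (n r : Int) : ∀ (L : List Int) (g : Nat) (idx : Int) (C : List Int),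
    loopB n r (L.length + g) (L.map (fun x => (x, false)) ++ C.map (fun x => (x, true))) idx false
      = (refillA n L idx []).2.2
        ++ loopB n r g ((C ++ (refillA n L idx []).2.1).map (fun x => (x, true))) (refillA n L idx []).1 false := by
  intro L
  induction L with
  | nil => intro g idx C; simp [refillA]
  | cons x t ih =>
    intro g idx C
    by_cases h : idx < n
    · have hfuel : (x :: t).length + g = (t.length + g) + 1 := by
        simp only [List.length_cons]; omega
      rw [hfuel]
      simp only [List.map_cons, List.cons_append]
      rw [loopB_cons n r (t.length + g) x 1 false _ idx false h (by simp)]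
      have hspawn : spawnB n x (!false) (Int.toNat 1)
            (t.map (fun x => (x, false)) ++ C.map (fun x => (x, true))) idx
          = (t.map (fun x => (x, false)) ++ C.map (fun x => (x, true)) ++ [(idx, true)], idx + 1, [(x, idx)]) := by
        simp [spawnB, h]
      rw [hspawn]
      have hq : t.map (fun x => (x, false)) ++ C.map (fun x => (x, true)) ++ [(idx, true)]
          = t.map (fun x => (x, false)) ++ (C ++ [idx]).map (fun x => (x, true)) := by simp
      rw [hq, ih g (idx + 1) (C ++ [idx])]
      simp only [refillA, if_pos h, List.nil_append]
      rw [refillA_acc n t (idx + 1) [idx]]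
      simp
    · have h' : n ≤ idx := not_lt.1 h
      rw [refillA_dead n (x :: t) idx [] h']
      rw [loopB_dead n r _ _ idx false h', loopB_dead n r g _ idx false h']
      simp

-- main bisimulation: A's state (cayley_shell, lieb_shell) corresponds to B's tagged FIFO queue
theorem main_sim (n r : Int) : ∀ (fA : Nat) (cay lieb : List Int) (idx : Int) (first : Bool) (fB : Nat) (rs : Int),
    rs = (if first then r + 1 else r) →
    (cay = [] → lieb = []) →
    cay.length + (n - idx).toNat ≤ fA →
    cay.length + lieb.length + (n - idx).toNat ≤ fB →
    outerA n fA cay lieb rs first idx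
      = loopB n r fB (cay.map (fun x => (x, true)) ++ lieb.map (fun x => (x, false))) idx first := by
  intro fA
  induction fA with
  | zero =>
    intro cay lieb idx first fB rs hrs hinv hA hB
    have hcay : cay = [] := by cases cay <;> simp_all
    have hlieb : lieb = [] := hinv hcay
    subst hcay; subst hlieb
    cases fB <;> simp [outerA, loopB]
  | succ f ih =>
    intro cay lieb idx first fB rs hrs hinv hA hB
    cases cay with
    | nil =>
      have hlieb : lieb = [] := hinv rfl
      subst hlieb
      cases fB <;> simp [outerA, loopB]
    | cons src ct =>
      by_cases hn : idx < n
      · obtain ⟨fb, rfl⟩ : ∃ fb, fB = fb + 1 := by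
          cases fB with
          | zero => simp only [List.length_cons] at hB; omega
          | succ fb => exact ⟨fb, rfl⟩
        set c := innerCayA n src rs.toNat idx [] with hc
        have hmeta := innerCayA_meta n src rs.toNat idx []
        rw [← hc] at hmeta
        have hrs1 : (if first then rs - 1 else rs) = r := by cases first <;> simp [hrs]
        have hAstep : innerCayA n src rs.toNat idx lieb = (c.1, lieb ++ c.2.1, c.2.2) := by
          rw [innerCayA_acc n src rs.toNat idx lieb, ← hc]
        simp only [List.map_cons, List.cons_append]
        rw [loopB_cons n r fb src rs true _ idx first hn (by cases first <;> simp [hrs])]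
        have hBstep : spawnB n src (!true) rs.toNat
              (ct.map (fun x => (x, true)) ++ lieb.map (fun x => (x, false))) idx
            = (ct.map (fun x => (x, true)) ++ lieb.map (fun x => (x, false)) ++ (c.2.1).map (fun x => (x, false)),
               c.1, c.2.2) := by
          rw [Bool.not_true, spawnB_sim n src rs.toNat idx _, ← hc]
        rw [hBstep]
        cases ct with
        | nil =>
          simp only [outerA, hAstep, hrs1]
          set u := refillA n (lieb ++ c.2.1) c.1 [] with hu
          have humeta := refillA_meta n (lieb ++ c.2.1) c.1 []
          rw [← hu] at humeta
          have hle : (lieb ++ c.2.1).length ≤ fb := by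
            simp only [List.length_append] at *
            simp only [List.length_cons, List.length_nil] at hB hmeta
            omega
          obtain ⟨g, hg⟩ : ∃ g, fb = (lieb ++ c.2.1).length + g :=
            ⟨fb - (lieb ++ c.2.1).length, by omega⟩
          rw [hg]
          have hL := lieb_sim n r (lieb ++ c.2.1) g c.1 []
          simp only [List.map_nil, List.append_nil, List.nil_append, List.map_append] at hL ⊢
          rw [hL, ← hu]
          have hrec := ih u.2.1 [] u.1 false g r (by simp) (fun _ => rfl) ?_ ?_
          · simp only [List.map_nil, List.append_nil] at hrec
            rw [hrec]
            simp
          · obtain ⟨hm1, hm2⟩ := hmeta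
            obtain ⟨hu1, hu2⟩ := humeta
            simp only [List.length_cons, List.length_nil] at hA hB hm1 hm2 hu1 hu2 ⊢
            omega
          · obtain ⟨hm1, hm2⟩ := hmeta
            obtain ⟨hu1, hu2⟩ := humeta
            simp only [List.length_append, List.length_cons, List.length_nil] at hA hB hm1 hm2 hu1 hu2 hg ⊢
            omega
        | cons d ds =>
          simp only [outerA, hAstep, hrs1]
          have hrec := ih (d :: ds) (lieb ++ c.2.1) c.1 false fb r (by simp) (by simp) ?_ ?_
          · rw [hrec]
            simp
          · obtain ⟨hm1, hm2⟩ := hmeta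
            simp only [List.length_cons, List.length_nil] at hA hB hm1 hm2 ⊢
            omega
          · obtain ⟨hm1, hm2⟩ := hmeta
            simp only [List.length_append, List.length_cons, List.length_nil] at hA hB hm1 hm2 ⊢
            omega
      · have h' : n ≤ idx := not_lt.1 hn
        rw [outerA_dead n (f + 1) (src :: ct) lieb _ first idx h']
        rw [loopB_dead n r (fB) _ idx first h']

-- ===== VERDICT (by name: the statement is the Claim_ definition above) =====
theorem tree_edges_py_spec : Claim_equal_tree_edges_py := by
  intro n r _ hpre
  unfold Spec_tree_edges_py tree_edges_py tree_edges_py_alt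
  by_cases h0 : n = 0
  · simp [h0]
  · have hpos : 1 ≤ n := by unfold Pre_tree_edges_py at hpre; omega
    rw [if_neg h0, if_neg (by omega)]
    have := main_sim n r (n.toNat + 1) [0] [] 1 true (n.toNat + 1) (r + 1)
      (by simp) (by simp) (by simp; omega) (by simp; omega)
    simpa using this

@[simp] theorem tree_edges_py_raises : Claim_raises_tree_edges_py := by
  unfold Claim_raises_tree_edges_py
  constructor
  · intro n r _ hr hp
    unfold Raises_tree_edges_py at hr
    unfold Pre_tree_edges_py at hp
    omega
  · exact ⟨by decide, by decide, by decide⟩
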